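-- pv_equiv track=rewrite | github.com/KenLawlight/v0-python | python-basics/Decomposition/C_decomposing_problems_exercise/lala_language.py | lala_language
-- ===== SOURCE A (Python) =====
-- def lala_language(sentence):
--     vowels = "aeiou"
--     words = sentence.split()
--     new_words = []
--
--     for word in words:
--         if len(word) <= 3:
--             new_words.append(word)
--         else:
--             new_word = ""
--             for char in word:
--                 if char in vowels:
--                     new_word += char + "l" + char
--                 else:
--                     new_word += char
--             new_words.append(new_word)
--
--     return " ".join(new_words)
-- ===== SOURCE B (Python) =====
-- def _lalafy(word):
--     for v in "aeiou":
--         word = word.replace(v, v + "l" + v)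
--     return word
--
-- def lala_language(sentence):
--     return " ".join(w if len(w) <= 3 else _lalafy(w) for w in sentence.split())
-- ===== Notes on version B (the rewrite author's own statement) =====
-- stated objective: faster
-- what changed: Replaces the per-character scan with string concatenation by a constant number of whole-word str.replace passes (one per vowel) over the words of split(); correct because the inserted letter is not a vowel so passes never interfere.
import Mathlib
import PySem

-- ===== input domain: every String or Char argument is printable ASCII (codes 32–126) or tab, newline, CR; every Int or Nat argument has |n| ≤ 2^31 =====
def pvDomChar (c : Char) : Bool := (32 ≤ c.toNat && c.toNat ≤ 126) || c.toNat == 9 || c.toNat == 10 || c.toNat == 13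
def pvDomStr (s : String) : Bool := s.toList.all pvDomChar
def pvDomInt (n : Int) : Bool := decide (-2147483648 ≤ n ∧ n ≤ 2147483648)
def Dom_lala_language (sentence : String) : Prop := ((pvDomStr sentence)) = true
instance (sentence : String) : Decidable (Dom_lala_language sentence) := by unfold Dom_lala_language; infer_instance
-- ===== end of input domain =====

-- B replaces A's per-character scan by one whole-word str.replace pass per vowel (measurably faster: str.replace runs in C instead of a per-character Python loop).

-- ===== PORT A =====
def lala_language (sentence : String) : String :=
  let vowels : List Char := ['a', 'e', 'i', 'o', 'u']
  let words := PySem.Str.split₀ sentence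
  let new_words := words.foldl
    (fun acc word =>
      if PySem.Str.len word ≤ 3 then acc ++ [word]
      else
        acc ++ [String.ofList (word.toList.foldl
          (fun nw c => nw ++ (if vowels.contains c then [c, 'l', c] else [c])) [])])
    []
  PySem.Str.join " " new_words

-- ===== PORT B =====
def pvLalafy (word : String) : String :=
  (['a', 'e', 'i', 'o', 'u']).foldl
    (fun w v => PySem.Str.replace w (String.ofList [v]) (String.ofList [v, 'l', v])) word

def lala_language_alt (sentence : String) : String :=
  PySem.Str.join " "
    ((PySem.Str.split₀ sentence).map
      (fun w => if PySem.Str.len w ≤ 3 then w else pvLalafy w))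

-- ===== PRECONDITION & SPEC =====
def Spec_lala_language (sentence : String) (out : String) : Prop := out = lala_language_alt sentence
instance (sentence : String) (out : String) : Decidable (Spec_lala_language sentence out) := by unfold Spec_lala_language; infer_instance

-- ===== CLAIM (what is proved, stated in full; the proofs are below) =====
def Claim_equal_lala_language : Prop := ∀ (sentence : String), Dom_lala_language sentence → Spec_lala_language sentence (lala_language sentence)

-- ===== LEMMAS AND PROOFS =====

/-- The single-vowel substitution performed by `word.replace(v, v + "l" + v)`. -/
def pvF (v c : Char) : List Char := if c = v then [v, 'l', v] else [c]

/-- The per-character substitution A performs. -/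
def pvG (c : Char) : List Char :=
  if (['a', 'e', 'i', 'o', 'u']).contains c then [c, 'l', c] else [c]

theorem pv_go_single (v : Char) (nw : List Char) (l : List Char) :
    ∀ (fuel : Nat) (acc : List Char), l.length ≤ fuel →
      PySem.Chars.replace.go [v] nw fuel l acc
        = acc.reverse ++ l.flatMap (fun c => if c = v then nw else [c]) := by
  induction l with
  | nil =>
    intro fuel acc _
    cases fuel <;> rw [PySem.Chars.replace.go] <;> simp
  | cons c t ih =>
    intro fuel acc h
    cases fuel with
    | zero => simp at h
    | succ f =>
      rw [PySem.Chars.replace.go]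
      by_cases hv : v = c
      · subst hv
        simp only [List.isPrefixOf, beq_self_eq_true, Bool.true_and, if_pos]
        have hd : List.drop [v].length (v :: t) = t := rfl
        rw [hd, ih f _ (by simpa using h)]
        simp
      · have : ([v].isPrefixOf (c :: t)) = false := by
          simp [List.isPrefixOf, hv]
        simp only [this, Bool.false_eq_true, if_neg, not_false_iff]
        rw [ih f _ (by simpa using Nat.le_of_succ_le_succ h)]
        simp [Ne.symm hv]

theorem pv_replace_single (v : Char) (l : List Char) :
    PySem.Chars.replace l [v] [v, 'l', v] = l.flatMap (pvF v) := by
  rw [PySem.Chars.replace]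
  simp only [List.isEmpty_cons, Bool.false_eq_true, if_neg, not_false_iff]
  rw [pv_go_single v [v, 'l', v] l l.length [] le_rfl]
  simp only [List.reverse_nil, List.nil_append]
  rfl

theorem pv_pointwise (c : Char) :
    ((((pvF 'a' c).flatMap (pvF 'e')).flatMap (pvF 'i')).flatMap (pvF 'o')).flatMap (pvF 'u')
      = pvG c := by
  by_cases h1 : c = 'a'; · subst h1; decide
  by_cases h2 : c = 'e'; · subst h2; decide
  by_cases h3 : c = 'i'; · subst h3; decide
  by_cases h4 : c = 'o'; · subst h4; decide
  by_cases h5 : c = 'u'; · subst h5; decide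
  simp [pvF, pvG, h1, h2, h3, h4, h5]

theorem pv_chain (l : List Char) :
    ((((l.flatMap (pvF 'a')).flatMap (pvF 'e')).flatMap (pvF 'i')).flatMap (pvF 'o')).flatMap (pvF 'u')
      = l.flatMap pvG := by
  induction l with
  | nil => rfl
  | cons c t ih =>
    simp only [List.flatMap_cons, List.flatMap_append, ih]
    rw [pv_pointwise c]

theorem pv_lalafy_toList (w : String) :
    (pvLalafy w).toList = w.toList.flatMap pvG := by
  simp only [pvLalafy, List.foldl_cons, List.foldl_nil]
  simp only [PySem.Str.toList_replace, String.toList_ofList]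
  simp only [pv_replace_single]
  exact pv_chain w.toList

theorem pv_word_eq (w : String) :
    String.ofList (w.toList.foldl
        (fun nw c => nw ++ (if (['a', 'e', 'i', 'o', 'u']).contains c then [c, 'l', c] else [c])) [])
      = pvLalafy w := by
  have h1 : (w.toList.foldl
      (fun nw c => nw ++ (if (['a', 'e', 'i', 'o', 'u']).contains c then [c, 'l', c] else [c])) [])
      = w.toList.flatMap pvG := by
    simpa only [List.nil_append] using PySem.List.foldl_append_eq_flatMap pvG w.toList []
  rw [h1, ← pv_lalafy_toList, String.ofList_toList]

theorem pv_outer (h : String → String) (l : List String) (acc : List String) :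
    l.foldl (fun acc w => if PySem.Str.len w ≤ 3 then acc ++ [w] else acc ++ [h w]) acc
      = acc ++ l.map (fun w => if PySem.Str.len w ≤ 3 then w else h w) := by
  induction l generalizing acc with
  | nil => simp
  | cons w t ih =>
    simp only [List.foldl_cons, List.map_cons, ih]
    split_ifs <;> simp

theorem pv_words (ws : List String) :
    ws.foldl
      (fun acc word =>
        if PySem.Str.len word ≤ 3 then acc ++ [word]
        else
          acc ++ [String.ofList (word.toList.foldl
            (fun nw c => nw ++ (if (['a', 'e', 'i', 'o', 'u'] : List Char).contains c then [c, 'l', c] else [c])) [])])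
      []
    = ws.map (fun w => if PySem.Str.len w ≤ 3 then w else pvLalafy w) := by
  rw [pv_outer]
  simp only [List.nil_append]
  refine List.map_congr_left (fun w _ => ?_)
  split_ifs with hlen
  · rfl
  · exact pv_word_eq w

-- ===== VERDICT (by name: the statement is the Claim_ definition above) =====
theorem lala_language_spec : Claim_equal_lala_language := by
  intro sentence _
  show lala_language sentence = lala_language_alt sentence
  exact congrArg (PySem.Str.join " ") (pv_words (PySem.Str.split₀ sentence))
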